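-- pv_equiv track=rewrite | github.com/kding1225/TDTS-visdrone | fcos_core/modeling/rpn/tdts_visdrone/utils.py | compute_start_points
-- ===== SOURCE A (Python) =====
-- def compute_start_points(shapes, margin):
--     """
--     tiling features in horizontal direction with a given margin
--     shapes: list, in NCHW format
--     margin: int, margin to tiling features of different levels
--     """
--     N, C, H0, W0 = shapes[0]
--     x0 = 0
--     start_points = []
--     ranges = []
--     for shape in shapes:
--         _, _, H, W = shape
--         y0 = H0 - H
--         start_points.append((y0, x0))
--         ranges.append((x0, y0, x0 + W, y0 + H))
--         x0 += W + margin
--     return start_points, ranges, (H0, x0)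
-- ===== SOURCE B (Python) =====
-- def compute_start_points(shapes, margin):
--     H0 = shapes[0][2]
--     # precompute horizontal offsets as a prefix table, then assemble by zipping
--     offs = [0]
--     x = 0
--     for s in shapes:
--         x += s[3] + margin
--         offs.append(x)
--     start_points = [(H0 - s[2], x0) for s, x0 in zip(shapes, offs)]
--     ranges = [(x0, H0 - s[2], x0 + s[3], H0) for s, x0 in zip(shapes, offs)]
--     return start_points, ranges, (H0, x)
-- ===== Notes on version B (the rewrite author's own statement) =====
-- stated objective: alternative
-- what changed: B precomputes a prefix table of horizontal offsets in one pass and then assembles start_points and ranges by zipping shapes with that table (using H0 directly as the range bottom), instead of threading a running x0 accumulator through a single output-building loop.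
import Mathlib
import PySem

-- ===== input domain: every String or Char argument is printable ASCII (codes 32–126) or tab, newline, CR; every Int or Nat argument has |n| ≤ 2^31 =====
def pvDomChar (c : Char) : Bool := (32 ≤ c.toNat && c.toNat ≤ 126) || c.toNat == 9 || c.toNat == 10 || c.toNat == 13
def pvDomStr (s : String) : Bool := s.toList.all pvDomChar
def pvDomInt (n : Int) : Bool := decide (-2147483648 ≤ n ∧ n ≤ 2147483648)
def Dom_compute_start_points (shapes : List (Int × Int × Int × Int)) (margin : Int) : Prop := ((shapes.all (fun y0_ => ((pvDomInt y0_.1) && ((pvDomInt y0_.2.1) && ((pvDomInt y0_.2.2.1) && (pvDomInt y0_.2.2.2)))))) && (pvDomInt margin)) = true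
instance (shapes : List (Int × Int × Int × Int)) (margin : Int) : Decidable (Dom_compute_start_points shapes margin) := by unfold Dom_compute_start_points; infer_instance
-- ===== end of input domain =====

-- B precomputes a prefix table of offsets, then zips; alternative decomposition, same cost.


-- ===== PORT A =====
def compute_start_points (shapes : List (Int × Int × Int × Int)) (margin : Int) : (List (Int × Int)) × (List (Int × Int × Int × Int)) × (Int × Int) :=
  match shapes with
  | [] => ([], [], (0, 0))   -- unreachable under Pre_ (Python raises IndexError)
  | h :: _ =>
    let H0 := h.2.2.1
    let st := shapes.foldl
      (fun (acc : Int × List (Int × Int) × List (Int × Int × Int × Int)) sh =>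
        let x0 := acc.1
        let H := sh.2.2.1
        let W := sh.2.2.2
        let y0 := H0 - H
        (x0 + W + margin, acc.2.1 ++ [(y0, x0)], acc.2.2 ++ [(x0, y0, x0 + W, y0 + H)]))
      (0, [], [])
    (st.2.1, st.2.2, (H0, st.1))

-- ===== PORT B =====
def compute_start_points_alt (shapes : List (Int × Int × Int × Int)) (margin : Int) : (List (Int × Int)) × (List (Int × Int × Int × Int)) × (Int × Int) :=
  match shapes with
  | [] => ([], [], (0, 0))   -- unreachable under Pre_ (Python raises IndexError)
  | h :: _ =>
    let H0 := h.2.2.1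
    let st := shapes.foldl
      (fun (acc : Int × List Int) s =>
        (acc.1 + s.2.2.2 + margin, acc.2 ++ [acc.1 + s.2.2.2 + margin]))
      (0, [0])
    let offs := st.2
    let start_points := (shapes.zip offs).map (fun p => (H0 - p.1.2.2.1, p.2))
    let ranges := (shapes.zip offs).map (fun p => (p.2, H0 - p.1.2.2.1, p.2 + p.1.2.2.2, H0))
    (start_points, ranges, (H0, st.1))

-- ===== PRECONDITION & SPEC =====
-- Pre_ excludes exactly the empty list, on which Python A raises IndexError at shapes[0].
def Pre_compute_start_points (shapes : List (Int × Int × Int × Int)) (margin : Int) : Prop := shapes ≠ []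
instance (shapes : List (Int × Int × Int × Int)) (margin : Int) : Decidable (Pre_compute_start_points shapes margin) := by unfold Pre_compute_start_points; infer_instance
def pvWitness_compute_start_points : (List (Int × Int × Int × Int)) × Int := ([(1, 3, 8, 8), (1, 3, 4, 4)], 2)
def Spec_compute_start_points (shapes : List (Int × Int × Int × Int)) (margin : Int) (out : (List (Int × Int)) × (List (Int × Int × Int × Int)) × (Int × Int)) : Prop := out = compute_start_points_alt shapes margin
instance (shapes : List (Int × Int × Int × Int)) (margin : Int) (out : (List (Int × Int)) × (List (Int × Int × Int × Int)) × (Int × Int)) : Decidable (Spec_compute_start_points shapes margin out) := by unfold Spec_compute_start_points; infer_instance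

-- ===== CLAIM (what is proved, stated in full; the proofs are below) =====
def Claim_equal_compute_start_points : Prop := ∀ (shapes : List (Int × Int × Int × Int)) (margin : Int), Dom_compute_start_points shapes margin → Pre_compute_start_points shapes margin → Spec_compute_start_points shapes margin (compute_start_points shapes margin)

-- ===== LEMMAS AND PROOFS =====

-- tail of the offset sequence starting after x
def offsTail (margin : Int) : List (Int × Int × Int × Int) → Int → List Int
  | [], _ => []
  | s :: r, x => (x + s.2.2.2 + margin) :: offsTail margin r (x + s.2.2.2 + margin)

def lastX (margin : Int) : List (Int × Int × Int × Int) → Int → Int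
  | [], x => x
  | s :: r, x => lastX margin r (x + s.2.2.2 + margin)

def spsPart (H0 margin : Int) : List (Int × Int × Int × Int) → Int → List (Int × Int)
  | [], _ => []
  | s :: r, x => (H0 - s.2.2.1, x) :: spsPart H0 margin r (x + s.2.2.2 + margin)

def rgsPart (H0 margin : Int) : List (Int × Int × Int × Int) → Int → List (Int × Int × Int × Int)
  | [], _ => []
  | s :: r, x => (x, H0 - s.2.2.1, x + s.2.2.2, H0) :: rgsPart H0 margin r (x + s.2.2.2 + margin)

theorem foldA_eq (H0 margin : Int) (shapes : List (Int × Int × Int × Int)) :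
    ∀ (x : Int) (sps : List (Int × Int)) (rgs : List (Int × Int × Int × Int)),
    shapes.foldl
      (fun (acc : Int × List (Int × Int) × List (Int × Int × Int × Int)) sh =>
        let x0 := acc.1
        let H := sh.2.2.1
        let W := sh.2.2.2
        let y0 := H0 - H
        (x0 + W + margin, acc.2.1 ++ [(y0, x0)], acc.2.2 ++ [(x0, y0, x0 + W, y0 + H)]))
      (x, sps, rgs)
    = (lastX margin shapes x, sps ++ spsPart H0 margin shapes x, rgs ++ rgsPart H0 margin shapes x) := by
  induction shapes with
  | nil => intro x sps rgs; simp [lastX, spsPart, rgsPart]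
  | cons s r ih =>
    intro x sps rgs
    simp only [List.foldl_cons, ih, lastX, spsPart, rgsPart,
      List.append_assoc, List.cons_append, List.nil_append]
    have h1 : H0 - s.2.2.1 + s.2.2.1 = H0 := by omega
    rw [h1]

theorem foldB_eq (margin : Int) (shapes : List (Int × Int × Int × Int)) :
    ∀ (x : Int) (pre : List Int),
    shapes.foldl
      (fun (acc : Int × List Int) s =>
        (acc.1 + s.2.2.2 + margin, acc.2 ++ [acc.1 + s.2.2.2 + margin]))
      (x, pre)
    = (lastX margin shapes x, pre ++ offsTail margin shapes x) := by
  induction shapes with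
  | nil => intro x pre; simp [lastX, offsTail]
  | cons s r ih =>
    intro x pre
    simp [List.foldl_cons, ih, lastX, offsTail]

theorem zip_sps (H0 margin : Int) (shapes : List (Int × Int × Int × Int)) :
    ∀ (x : Int),
    (shapes.zip (x :: offsTail margin shapes x)).map (fun p => (H0 - p.1.2.2.1, p.2))
    = spsPart H0 margin shapes x := by
  induction shapes with
  | nil => intro x; simp [spsPart]
  | cons s r ih => intro x; simp [offsTail, spsPart, ih]

theorem zip_rgs (H0 margin : Int) (shapes : List (Int × Int × Int × Int)) :
    ∀ (x : Int),
    (shapes.zip (x :: offsTail margin shapes x)).map (fun p => (p.2, H0 - p.1.2.2.1, p.2 + p.1.2.2.2, H0))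
    = rgsPart H0 margin shapes x := by
  induction shapes with
  | nil => intro x; simp [rgsPart]
  | cons s r ih => intro x; simp [offsTail, rgsPart, ih]

-- ===== VERDICT (by name: the statement is the Claim_ definition above) =====
theorem compute_start_points_spec : Claim_equal_compute_start_points := by
  intro shapes margin _ hpre
  unfold Spec_compute_start_points
  match shapes with
  | [] => exact absurd rfl hpre
  | h :: t =>
    simp only [compute_start_points, compute_start_points_alt,
      foldA_eq h.2.2.1 margin (h :: t) 0 [] [],
      foldB_eq margin (h :: t) 0 [0], List.nil_append, List.singleton_append,
      zip_sps, zip_rgs]
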